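-- pv_equiv track=rewrite | github.com/Codetesing/Programmers_py | level_1/example07.py | solution
-- ===== SOURCE A (Python) =====
-- def solution(answers):
--     answer = []
--     tmp = [[1, 2, 3, 4, 5], [2, 1, 2, 3, 2, 4, 2, 5], [3, 3, 1, 1, 2, 2, 4, 4, 5, 5]]
--
--     for i in range(len(tmp)) :
--         len_tmp = len(tmp[i])
--         k = 0
--         key = 0
--
--         for j in range(len(answers)) :
--             if(tmp[i][k] == answers[j]) :
--                 key = key + 1
--             k = int((k + 1) % len_tmp)
--         answer.append(key)
--
--     max_ans = max(answer)
--
--     return [i + 1 for i, j in enumerate(answer) if j == max_ans]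
-- ===== SOURCE B (Python) =====
-- def solution(answers):
--     patterns = [[1, 2, 3, 4, 5], [2, 1, 2, 3, 2, 4, 2, 5], [3, 3, 1, 1, 2, 2, 4, 4, 5, 5]]
--     # 40 = lcm(5, 8, 10): each pattern repeats with period dividing 40, so a
--     # histogram over (position mod 40, answer value) determines every score.
--     hist = {}
--     for k in [(i % 40, a) for i, a in enumerate(answers)]:
--         hist[k] = hist.get(k, 0) + 1
--     scores = [sum(hist.get((j, pat[j % len(pat)]), 0) for j in range(40))
--               for pat in patterns]
--     best = max(scores)
--     return [p + 1 for p, s in enumerate(scores) if s == best]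
-- ===== Notes on version B (the rewrite author's own statement) =====
-- stated objective: alternative
-- what changed: B replaces A's three pattern-wise scans of answers by building one histogram dict keyed by (position mod 40, answer) in a single pass (40 = lcm of the pattern lengths) and then reading each pattern's score off the histogram with 40 constant-time lookups.
import Mathlib
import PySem

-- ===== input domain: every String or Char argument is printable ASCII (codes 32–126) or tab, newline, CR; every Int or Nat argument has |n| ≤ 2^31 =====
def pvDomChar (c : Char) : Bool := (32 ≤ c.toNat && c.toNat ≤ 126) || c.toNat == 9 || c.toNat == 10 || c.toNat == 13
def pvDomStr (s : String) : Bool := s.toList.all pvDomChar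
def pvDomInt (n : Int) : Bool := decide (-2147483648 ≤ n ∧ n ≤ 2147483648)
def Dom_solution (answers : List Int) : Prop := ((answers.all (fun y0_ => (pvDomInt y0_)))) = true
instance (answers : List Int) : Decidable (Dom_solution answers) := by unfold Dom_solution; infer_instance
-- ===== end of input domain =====

-- B replaces A's three pattern-wise cyclic scans by one histogram over
-- (position mod 40, answer) built in a single pass (40 = lcm(5,8,10)),
-- from which each pattern's score is read with 40 lookups; same asymptotic cost.

-- ===== PORT A =====
-- the constant table tmp of A
def tmpA : List (List Int) := [[1, 2, 3, 4, 5], [2, 1, 2, 3, 2, 4, 2, 5], [3, 3, 1, 1, 2, 2, 4, 4, 5, 5]]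

-- inner-loop body: state (k, key); Python's tmp[i][k] is always in range (0 ≤ k < len_tmp),
-- so pyGetD with default 0 is exact here
def stepA (pat : List Int) (len_tmp : Int) (st : Int × Int) (a : Int) : Int × Int :=
  (PySem.Int.mod (st.1 + 1) len_tmp, if PySem.List.pyGetD pat st.1 0 = a then st.2 + 1 else st.2)

-- the inner 'for j in range(len(answers))' loop producing key for one pattern
def keyA (answers : List Int) (pat : List Int) : Int :=
  let len_tmp : Int := pat.length
  ((PySem.List.pyRange 0 (answers.length : Int) 1).foldl
    (fun st j => stepA pat len_tmp st (PySem.List.pyGetD answers j 0)) ((0 : Int), (0 : Int))).2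

def solution (answers : List Int) : List Int :=
  let answer := tmpA.foldl (fun acc pat => acc ++ [keyA answers pat]) ([] : List Int)
  let max_ans := (PySem.List.max? answer (fun x => x)).getD 0   -- answer always has 3 elements, so max? is some
  (PySem.List.enumerate answer).foldl
    (fun acc ij => if ij.2 = max_ans then acc ++ [ij.1 + 1] else acc) []

-- ===== PORT B =====
def patternsB : List (List Int) := [[1, 2, 3, 4, 5], [2, 1, 2, 3, 2, 4, 2, 5], [3, 3, 1, 1, 2, 2, 4, 4, 5, 5]]

-- 'hist[k] = hist.get(k, 0) + 1' over the key list [(i % 40, a) for i, a in enumerate(answers)]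
def histB (answers : List Int) : PySem.Dict (Int × Int) Int :=
  ((PySem.List.enumerate answers).map (fun ia => (PySem.Int.mod ia.1 40, ia.2))).foldl
    (fun d k => d.insert k (d.getD k 0 + 1)) PySem.Dict.empty

-- 'sum(hist.get((j, pat[j % len(pat)]), 0) for j in range(40))'; pattern indices are in range,
-- so pyGetD with default 0 is exact
def scoreB (hist : PySem.Dict (Int × Int) Int) (pat : List Int) : Int :=
  ((PySem.List.pyRange 0 40 1).map
    (fun j => hist.getD (j, PySem.List.pyGetD pat (PySem.Int.mod j (pat.length : Int)) 0) 0)).sum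

def solution_alt (answers : List Int) : List Int :=
  let hist := histB answers
  let scores := patternsB.map (scoreB hist)
  let best := (PySem.List.max? scores (fun x => x)).getD 0   -- scores has 3 elements, so max? is some
  (PySem.List.enumerate scores).foldl
    (fun acc ps => if ps.2 = best then acc ++ [ps.1 + 1] else acc) []

-- ===== PRECONDITION & SPEC =====
def Spec_solution (answers : List Int) (out : List Int) : Prop := out = solution_alt answers
instance (answers : List Int) (out : List Int) : Decidable (Spec_solution answers out) := by unfold Spec_solution; infer_instance

-- ===== CLAIM (what is proved, stated in full; the proofs are below) =====
def Claim_equal_solution : Prop := ∀ (answers : List Int), Dom_solution answers → Spec_solution answers (solution answers)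

-- ===== LEMMAS AND PROOFS =====

-- indicator: does pattern pat, repeated cyclically, match answer a at position i?
def ind (pat : List Int) (i a : Int) : Int :=
  if PySem.List.pyGetD pat (PySem.Int.mod i (pat.length : Int)) 0 = a then 1 else 0

-- common spec: number of positions (starting at i) where pat, repeated cyclically, matches
def cnt (pat : List Int) : Int → List Int → Int
  | _, [] => 0
  | i, a :: xs => ind pat i a + cnt pat (i + 1) xs

theorem mod_succ_mod (i L : Int) (hL : 0 < L) :
    PySem.Int.mod (PySem.Int.mod i L + 1) L = PySem.Int.mod (i + 1) L := by
  simp only [PySem.Int.mod_eq_emod_of_pos hL]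
  rw [Int.emod_def i L, show i - L * (i / L) + 1 = (i + 1) + L * (-(i / L)) by ring,
      Int.add_mul_emod_self_left]

theorem keyA_loop (pat : List Int) (hL : pat ≠ []) :
    ∀ (xs : List Int) (i key : Int),
      (xs.foldl (stepA pat (pat.length : Int)) (PySem.Int.mod i (pat.length : Int), key)).2
        = key + cnt pat i xs := by
  intro xs
  induction xs with
  | nil => intro i key; simp [cnt]
  | cons a xs ih =>
      intro i key
      have hL' : (0 : Int) < (pat.length : Int) := by
        have := List.length_pos_iff.mpr hL; exact_mod_cast this
      simp only [List.foldl_cons, stepA, cnt, mod_succ_mod i _ hL', ih (i + 1)]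
      simp only [ind]; split <;> ring

theorem keyA_eq_cnt (answers pat : List Int) (hL : pat ≠ []) :
    keyA answers pat = cnt pat 0 answers := by
  simp only [keyA]
  rw [PySem.List.foldl_pyRange_zero_pyGetD' answers 0
        (fun st a => stepA pat (pat.length : Int) st a) ((0 : Int), (0 : Int))]
  have hL' : (0 : Int) < (pat.length : Int) := by
    have := List.length_pos_iff.mpr hL; exact_mod_cast this
  have h0 : PySem.Int.mod 0 (pat.length : Int) = 0 := by
    rw [PySem.Int.mod_eq_emod_of_pos hL']; simp
  have := keyA_loop pat hL answers 0 0
  rw [h0] at this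
  rw [this]; ring

-- the histogram is a counter of the key list
theorem getD_histB (answers : List Int) (k : Int × Int) :
    (histB answers).getD k 0
      = (((PySem.List.enumerate answers).map (fun ia => (PySem.Int.mod ia.1 40, ia.2))).count k : Int) := by
  simp [histB, PySem.Dict.getD_foldl_insert_add_one]

theorem sum_ind_not_mem (l : List Int) (r a : Int) (f : Int → Int) (hmem : r ∉ l) :
    (l.map (fun j => if ((r, a) : Int × Int) = (j, f j) then (1 : Int) else 0)).sum = 0 := by
  induction l with
  | nil => simp
  | cons j l ih =>
      simp only [List.map_cons, List.sum_cons]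
      rw [if_neg (by rintro ⟨rfl, -⟩; exact hmem (List.mem_cons_self))]
      rw [ih (fun h => hmem (List.mem_cons_of_mem _ h))]
      ring
  -- rintro on Prod.mk.injEq? (r,a)=(j,fj): Prod equality; rintro ⟨rfl,-⟩ may fail; fix later

theorem sum_ind_list (l : List Int) (r a : Int) (f : Int → Int) (hnd : l.Nodup) (hmem : r ∈ l) :
    (l.map (fun j => if ((r, a) : Int × Int) = (j, f j) then (1 : Int) else 0)).sum
      = if f r = a then 1 else 0 := by
  induction l with
  | nil => cases hmem
  | cons j l ih =>
      simp only [List.map_cons, List.sum_cons]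
      rcases List.mem_cons.mp hmem with rfl | hm
      · have hnl : r ∉ l := (List.nodup_cons.mp hnd).1
        rw [sum_ind_not_mem l r a f hnl]
        simp only [Prod.mk.injEq, true_and]
        rcases eq_or_ne (f r) a with h | h
        · simp [h]
        · simp [h, Ne.symm h]
      · have hjr : j ≠ r := by rintro rfl; exact (List.nodup_cons.mp hnd).1 hm
        rw [if_neg (by rintro ⟨rfl, -⟩; exact hjr rfl), ih (List.nodup_cons.mp hnd).2 hm]
        ring

theorem mod_mod_forty (i L : Int) (hL : 0 < L) (hdvd : L ∣ 40) :
    PySem.Int.mod (PySem.Int.mod i 40) L = PySem.Int.mod i L := by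
  simp only [PySem.Int.mod_eq_emod_of_pos hL,
    PySem.Int.mod_eq_emod_of_pos (by norm_num : (0:Int) < 40)]
  exact Int.emod_emod_of_dvd i hdvd

theorem count_sum (pat : List Int) (hL : pat ≠ []) (hdvd : (pat.length : Int) ∣ 40) :
    ∀ (xs : List Int) (i : Int),
      ((PySem.List.pyRange 0 40 1).map
        (fun j => (((PySem.List.enumerate xs i).map (fun ia => (PySem.Int.mod ia.1 40, ia.2))).count
            (j, PySem.List.pyGetD pat (PySem.Int.mod j (pat.length : Int)) 0) : Int))).sum
      = cnt pat i xs := by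
  intro xs
  induction xs with
  | nil => intro i; simp [PySem.List.enumerate_nil, cnt]
  | cons a xs ih =>
      intro i
      have hL' : (0 : Int) < (pat.length : Int) := by
        have := List.length_pos_iff.mpr hL; exact_mod_cast this
      rw [PySem.List.enumerate_cons]
      simp only [List.map_cons, List.count_cons]
      push_cast
      rw [PySem.List.sum_map_add_int, ih (i + 1)]
      have hind : ((PySem.List.pyRange 0 40 1).map
          (fun j => if ((((PySem.Int.mod i 40, a) : Int × Int)) ==
              (j, PySem.List.pyGetD pat (PySem.Int.mod j (pat.length : Int)) 0)) = true
            then (1 : Int) else 0)).sum = ind pat i a := by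
        simp only [beq_iff_eq]
        rw [sum_ind_list _ _ _ _ (PySem.List.nodup_pyRange_one 0 40)
          (PySem.List.mem_pyRange_one.mpr
            ⟨PySem.Int.mod_nonneg i (by norm_num), PySem.Int.mod_lt i (by norm_num)⟩)]
        rw [mod_mod_forty i (pat.length : Int) hL' hdvd]
        rfl
      rw [hind]
      simp [cnt]; ring

-- the B-side score of one pattern is the common count
theorem scoreB_eq_cnt (pat : List Int) (hL : pat ≠ []) (hdvd : (pat.length : Int) ∣ 40)
    (answers : List Int) : scoreB (histB answers) pat = cnt pat 0 answers := by
  simp only [scoreB, getD_histB]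
  exact count_sum pat hL hdvd answers 0

theorem solution_eq (answers : List Int) : solution answers = solution_alt answers := by
  simp only [solution, solution_alt, tmpA, patternsB, List.foldl_cons, List.foldl_nil,
    List.nil_append, List.map_cons, List.map_nil]
  simp only [keyA_eq_cnt answers [1, 2, 3, 4, 5] (by decide),
      keyA_eq_cnt answers [2, 1, 2, 3, 2, 4, 2, 5] (by decide),
      keyA_eq_cnt answers [3, 3, 1, 1, 2, 2, 4, 4, 5, 5] (by decide),
      scoreB_eq_cnt [1, 2, 3, 4, 5] (by decide) (by norm_num) answers,
      scoreB_eq_cnt [2, 1, 2, 3, 2, 4, 2, 5] (by decide) (by norm_num) answers,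
      scoreB_eq_cnt [3, 3, 1, 1, 2, 2, 4, 4, 5, 5] (by decide) (by norm_num) answers]
  rfl

-- ===== VERDICT (by name: the statement is the Claim_ definition above) =====
theorem solution_spec : Claim_equal_solution := by
  intro answers _
  unfold Spec_solution
  exact solution_eq answers
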